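-- pv_equiv track=rewrite | github.com/Nauxie/ics32a_workspace | final_practice/multiply_perimeter.py | max_diagonal_streak
-- ===== SOURCE A (Python) =====
-- def max_diagonal_streak(L):
--     max_value = 0
--     for i in range(len(L)):
--         counter = 1
--         while ((i+counter) < len(L) and L[i][i] == L[i+counter][i+counter]):
--             counter += 1
--         if (counter > max_value):
--             max_value = counter
--     if (max_value == 1):
--         return 0
--     return max_value
-- ===== SOURCE B (Python) =====
-- def max_diagonal_streak(L):
--     # One linear pass over the diagonal, tracking the current run of equal
--     # consecutive values; a streak needs at least two entries.
--     if len(L) < 2: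
--         return 0
--     best = cur = 1
--     prev = L[0][0]
--     for i in range(1, len(L)):
--         v = L[i][i]
--         cur = cur + 1 if v == prev else 1
--         best = max(best, cur)
--         prev = v
--     return best if best > 1 else 0
-- ===== Notes on version B (the rewrite author's own statement) =====
-- stated objective: faster
-- what changed: Replaced the per-index rescan of the diagonal (a while-loop restarted at every i) with a single linear pass that tracks the current run length of equal consecutive diagonal values and the best run seen.
import Mathlib
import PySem

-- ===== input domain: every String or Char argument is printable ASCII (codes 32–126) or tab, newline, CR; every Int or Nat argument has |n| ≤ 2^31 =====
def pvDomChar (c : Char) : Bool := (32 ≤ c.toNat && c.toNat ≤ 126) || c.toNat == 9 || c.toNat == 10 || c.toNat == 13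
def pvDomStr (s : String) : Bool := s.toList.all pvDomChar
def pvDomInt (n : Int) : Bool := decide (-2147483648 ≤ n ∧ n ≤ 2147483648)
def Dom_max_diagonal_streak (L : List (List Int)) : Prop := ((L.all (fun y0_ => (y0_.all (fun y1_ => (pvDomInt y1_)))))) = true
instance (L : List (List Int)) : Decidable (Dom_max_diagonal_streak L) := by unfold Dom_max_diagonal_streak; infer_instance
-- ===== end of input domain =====

-- B replaces A's per-index rescan of the diagonal by a single linear pass tracking the
-- current run of equal consecutive diagonal values (O(n) instead of O(n^2)).


-- ===== PORT A =====
-- L[i][i], meaningful on Pre_ (where Python's indexing succeeds); defaults to 0 outside Pre_.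
def pvDg (L : List (List Int)) (i : Nat) : Int :=
  (((PySem.List.pyGet? L (i : Int)).bind (fun r => PySem.List.pyGet? r (i : Int))).getD 0)

-- the inner while-loop of A
def pvWhileA (L : List (List Int)) (i c : Nat) : Nat :=
  if h : i + c < L.length ∧ pvDg L i = pvDg L (i + c) then pvWhileA L i (c + 1) else c
termination_by L.length - (i + c)
decreasing_by omega

def max_diagonal_streak (L : List (List Int)) : Int :=
  let mv := (List.range L.length).foldl (fun mv i =>
    let c : Int := (pvWhileA L i 1 : Int)
    if mv < c then c else mv) 0
  if mv = 1 then 0 else mv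

-- ===== PORT B =====
-- loop body of B: state (best, cur, prev), incoming diagonal value v
def pvStepB (st : Int × Int × Int) (v : Int) : Int × Int × Int :=
  let cur := if v = st.2.2 then st.2.1 + 1 else 1
  (max st.1 cur, cur, v)

def max_diagonal_streak_alt (L : List (List Int)) : Int :=
  if L.length < 2 then 0
  else
    let st := (List.range' 1 (L.length - 1)).foldl
      (fun st i => pvStepB st (pvDg L i)) (1, 1, pvDg L 0)
    if 1 < st.1 then st.1 else 0

-- ===== PRECONDITION & SPEC =====
-- Pre_ excludes exactly the inputs where Python A raises IndexError: two or more rows with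
-- some row i shorter than i+1 (with ≤ 1 row A never indexes and returns 0).
def Pre_max_diagonal_streak (L : List (List Int)) : Prop :=
  L.length ≤ 1 ∨ ∀ i, (h : i < L.length) → i < (L[i]).length
instance (L : List (List Int)) : Decidable (Pre_max_diagonal_streak L) := by
  unfold Pre_max_diagonal_streak; infer_instance
def pvWitness_max_diagonal_streak : List (List Int) := [[1, 2], [3, 1]]

def Spec_max_diagonal_streak (L : List (List Int)) (out : Int) : Prop := out = max_diagonal_streak_alt L
instance (L : List (List Int)) (out : Int) : Decidable (Spec_max_diagonal_streak L out) := by unfold Spec_max_diagonal_streak; infer_instance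

-- ===== CLAIM (what is proved, stated in full; the proofs are below) =====
def Claim_equal_max_diagonal_streak : Prop := ∀ (L : List (List Int)), Dom_max_diagonal_streak L → Pre_max_diagonal_streak L → Spec_max_diagonal_streak L (max_diagonal_streak L)

-- ===== LEMMAS AND PROOFS =====

-- length of the longest prefix of the list whose elements all equal x
def pvCpe (x : Int) : List Int → Int
  | [] => 0
  | y :: ys => if y = x then 1 + pvCpe x ys else 0

-- longest run of equal consecutive elements (max over all suffixes of the head run)
def pvM : List Int → Int
  | [] => 0
  | x :: xs => max (1 + pvCpe x xs) (pvM xs)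

-- the diagonal as a list
def pvDiag (L : List (List Int)) : List Int := (List.range L.length).map (pvDg L)

theorem pvCpe_nonneg (x : Int) (xs : List Int) : 0 ≤ pvCpe x xs := by
  induction xs with
  | nil => simp [pvCpe]
  | cons y ys ih => simp only [pvCpe]; split <;> omega

theorem pvDiag_drop (L : List (List Int)) (i : Nat) (h : i < L.length) :
    (pvDiag L).drop i = pvDg L i :: (pvDiag L).drop (i + 1) := by
  have hl : i < (pvDiag L).length := by simp [pvDiag]; omega
  rw [List.drop_eq_getElem_cons hl]
  simp [pvDiag]

-- the tail-count of A's while loop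
def pvCnt (L : List (List Int)) (i j : Nat) : Int :=
  if h : j < L.length ∧ pvDg L j = pvDg L i then 1 + pvCnt L i (j + 1) else 0
termination_by L.length - j
decreasing_by omega

theorem pvWhileA_eq_cnt (L : List (List Int)) (i c : Nat) :
    (pvWhileA L i c : Int) = c + pvCnt L i (i + c) := by
  induction c using pvWhileA.induct (L := L) (i := i) with
  | case1 c h ih =>
      have h' : pvCnt L i (i + c) = 1 + pvCnt L i (i + c + 1) := by
        rw [pvCnt, dif_pos ⟨h.1, h.2.symm⟩]
      rw [pvWhileA, dif_pos h, ih, h', show i + (c + 1) = i + c + 1 from by omega]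
      push_cast; ring
  | case2 c h =>
      rw [pvWhileA, dif_neg h, pvCnt, dif_neg (fun hc => h ⟨hc.1, hc.2.symm⟩)]
      omega

theorem pvCnt_eq_cpe (L : List (List Int)) (i j : Nat) :
    pvCnt L i j = pvCpe (pvDg L i) ((pvDiag L).drop j) := by
  induction j using pvCnt.induct (L := L) (i := i) with
  | case1 j h ih =>
      rw [pvCnt, dif_pos h, pvDiag_drop L j h.1, pvCpe, if_pos h.2, ih]
  | case2 j h =>
      rw [pvCnt, dif_neg h]
      by_cases hj : j < L.length
      · rw [pvDiag_drop L j hj, pvCpe, if_neg (fun he => h ⟨hj, he⟩)]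
      · rw [List.drop_eq_nil_of_le (by simp [pvDiag]; omega), pvCpe]

-- A's fold over range' i cnt (with i + cnt = n) computes max acc (pvM (diag.drop i))
theorem pvFoldA (L : List (List Int)) :
    ∀ (cnt i : Nat) (acc : Int), i + cnt = L.length → 0 ≤ acc →
      (List.range' i cnt).foldl (fun mv k =>
        let c : Int := (pvWhileA L k 1 : Int)
        if mv < c then c else mv) acc = max acc (pvM ((pvDiag L).drop i)) := by
  intro cnt
  induction cnt with
  | zero =>
      intro i acc h hacc
      rw [List.range'_zero, List.foldl_nil,
        List.drop_eq_nil_of_le (by simp [pvDiag]; omega), pvM]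
      omega
  | succ m ih =>
      intro i acc h hacc
      have hi : i < L.length := by omega
      have hw : (pvWhileA L i 1 : Int) = 1 + pvCpe (pvDg L i) ((pvDiag L).drop (i + 1)) := by
        rw [pvWhileA_eq_cnt, pvCnt_eq_cpe]; norm_num
      rw [List.range'_succ, List.foldl_cons, ih (i + 1) _ (by omega) (by simp only [hw]; split <;> omega)]
      rw [pvDiag_drop L i hi, pvM]
      simp only [hw]
      split <;> omega

-- B's streaming fold: best becomes max best (max (cur + count continuing prev) (longest run in xs))
theorem pvFoldB : ∀ (xs : List Int) (prev best cur : Int), 1 ≤ cur → cur ≤ best →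
    (xs.foldl pvStepB (best, cur, prev)).1 = max best (max (cur + pvCpe prev xs) (pvM xs)) := by
  intro xs
  induction xs with
  | nil =>
      intro prev best cur h1 h2
      simp [pvCpe, pvM]; omega
  | cons v rest ih =>
      intro prev best cur h1 h2
      rw [List.foldl_cons]
      by_cases hv : v = prev
      · have hst : pvStepB (best, cur, prev) v = (max best (cur + 1), cur + 1, v) := by
          simp [pvStepB, hv]
        rw [hst, ih v _ _ (by omega) (by omega)]
        subst hv
        rw [pvCpe, if_pos rfl, pvM]
        have := pvCpe_nonneg v rest
        omega
      · have hst : pvStepB (best, cur, prev) v = (max best 1, 1, v) := by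
          simp [pvStepB, hv]
        rw [hst, ih v _ _ (by omega) (by omega)]
        rw [pvCpe, if_neg hv, pvM]
        have := pvCpe_nonneg v rest
        omega

-- ===== VERDICT (by name: the statement is the Claim_ definition above) =====
theorem max_diagonal_streak_spec : Claim_equal_max_diagonal_streak := by
  intro L _ _
  unfold Spec_max_diagonal_streak max_diagonal_streak max_diagonal_streak_alt
  have hA : (List.range L.length).foldl (fun mv k =>
        let c : Int := (pvWhileA L k 1 : Int)
        if mv < c then c else mv) 0 = max 0 (pvM (pvDiag L)) := by
    rw [List.range_eq_range']
    simpa using pvFoldA L L.length 0 0 (by omega) le_rfl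
  simp only [hA]
  by_cases hn : L.length < 2
  · rw [if_pos hn]
    interval_cases h : L.length
    · have hd : pvDiag L = [] := by simp [pvDiag, h]
      rw [hd]; norm_num [pvM]
    · have hd : pvDiag L = [pvDg L 0] := by simp [pvDiag, h, List.range_succ]
      rw [hd]; norm_num [pvM, pvCpe]
  · rw [if_neg hn]
    obtain ⟨m, hm⟩ : ∃ m, L.length = m + 1 := ⟨L.length - 1, by omega⟩
    have hdrop : (pvDiag L).drop 1 = (List.range' 1 (L.length - 1)).map (pvDg L) := by
      unfold pvDiag
      rw [← List.map_drop]
      congr 1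
      rw [List.range_eq_range', hm, List.range'_succ]
      simp
    have hd : pvDiag L = pvDg L 0 :: (pvDiag L).drop 1 := by
      simpa using pvDiag_drop L 0 (by omega)
    rw [← List.foldl_map, ← hdrop, pvFoldB _ _ _ _ le_rfl le_rfl]
    have hMd : pvM (pvDiag L) = max (1 + pvCpe (pvDg L 0) ((pvDiag L).drop 1)) (pvM ((pvDiag L).drop 1)) := by
      conv_lhs => rw [hd]
      rw [pvM]
    rw [hMd]
    have h1 := pvCpe_nonneg (pvDg L 0) ((pvDiag L).drop 1)
    have h2 : 0 ≤ pvM ((pvDiag L).drop 1) := by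
      clear hd hdrop
      induction ((pvDiag L).drop 1) with
      | nil => simp [pvM]
      | cons x xs ih => rw [pvM]; have := pvCpe_nonneg x xs; omega
    split <;> omega
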